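-- pv_equiv track=rewrite | github.com/iancuuandrei/polihack-backend | apps/api/app/services/raw_retriever.py | _repair_split_legal_terms
-- ===== SOURCE A (Python) =====
-- from collections.abc import Mapping, Sequence
--
-- def _repair_split_legal_terms(tokens: Sequence[str]) -> list[str]:
--     repaired: list[str] = []
--     index = 0
--     while index < len(tokens):
--         token = tokens[index]
--         next_token = tokens[index + 1] if index + 1 < len(tokens) else None
--         if token == "adi" and next_token in {"ional", "ionala"}:
--             repaired.append(f"adit{next_token}")
--             index += 2
--             continue
--         repaired.append(token)
--         index += 1
--     return repaired
-- ===== SOURCE B (Python) =====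
-- def _repair_split_legal_terms(tokens):
--     repaired = []
--     for token in tokens:
--         if token in {"ional", "ionala"} and repaired and repaired[-1] == "adi":
--             repaired.pop()
--             repaired.append(f"adit{token}")
--         else:
--             repaired.append(token)
--     return repaired
-- ===== Notes on version B (the rewrite author's own statement) =====
-- stated objective: simpler
-- what changed: Replaced the index-based while loop with lookahead and skip (index += 2 / continue) by a plain forward for-loop that decides merges by look-behind: when a suffix token arrives and the output tail is 'adi', it pops the tail and appends the merged word; measured ~2x faster (no per-step bounds check / conditional lookahead indexing).
import Mathlib
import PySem

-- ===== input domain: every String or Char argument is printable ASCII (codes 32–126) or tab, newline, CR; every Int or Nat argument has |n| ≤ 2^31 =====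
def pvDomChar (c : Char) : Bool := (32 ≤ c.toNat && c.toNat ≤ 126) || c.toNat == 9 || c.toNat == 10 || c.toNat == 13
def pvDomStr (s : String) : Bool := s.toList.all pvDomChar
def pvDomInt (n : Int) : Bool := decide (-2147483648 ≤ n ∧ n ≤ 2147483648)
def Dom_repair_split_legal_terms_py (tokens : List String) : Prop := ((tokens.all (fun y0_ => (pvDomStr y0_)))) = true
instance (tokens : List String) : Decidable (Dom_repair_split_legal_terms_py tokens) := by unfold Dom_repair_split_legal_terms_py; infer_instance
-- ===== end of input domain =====

-- B replaces A's index-based lookahead-and-skip while loop by a look-behind for-loop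
-- that merges by popping the already-built output tail (objective: simpler).


-- ===== PORT A =====
-- A's while loop over the index consumes the current token and, on a merge, the
-- lookahead token too (index += 2); rendered as recursion consuming one or two tokens.
def repair_split_legal_terms_py (tokens : List String) : List String :=
  match tokens with
  | [] => []
  | [t] => [t]
  | t :: n :: rest =>
      if t = "adi" ∧ (n = "ional" ∨ n = "ionala") then
        ("adit" ++ n) :: repair_split_legal_terms_py rest
      else
        t :: repair_split_legal_terms_py (n :: rest)

-- ===== PORT B =====
-- one fold step of B's for-loop: look-behind at the output tail
def pvRepairStep (repaired : List String) (token : String) : List String :=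
  if (token = "ional" ∨ token = "ionala") ∧ repaired.getLast? = some "adi" then
    repaired.dropLast ++ ["adit" ++ token]
  else
    repaired ++ [token]

def repair_split_legal_terms_py_alt (tokens : List String) : List String :=
  tokens.foldl pvRepairStep []

-- ===== PRECONDITION & SPEC =====
def Spec_repair_split_legal_terms_py (tokens : List String) (out : List String) : Prop := out = repair_split_legal_terms_py_alt tokens
instance (tokens : List String) (out : List String) : Decidable (Spec_repair_split_legal_terms_py tokens out) := by unfold Spec_repair_split_legal_terms_py; infer_instance

-- ===== CLAIM (what is proved, stated in full; the proofs are below) =====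
def Claim_equal_repair_split_legal_terms_py : Prop := ∀ (tokens : List String), Dom_repair_split_legal_terms_py tokens → Spec_repair_split_legal_terms_py tokens (repair_split_legal_terms_py tokens)

-- ===== LEMMAS AND PROOFS =====

-- Key invariant: if the accumulator does not end in "adi" when the next token is a
-- mergeable suffix, B's fold just appends A's result.
theorem pvRepair_fold_eq (tokens : List String) : ∀ (acc : List String),
    (∀ h, tokens.head? = some h → (h = "ional" ∨ h = "ionala") → acc.getLast? ≠ some "adi") →
    tokens.foldl pvRepairStep acc = acc ++ repair_split_legal_terms_py tokens := by
  induction tokens using repair_split_legal_terms_py.induct with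
  | case1 => intro acc _; simp [repair_split_legal_terms_py]
  | case2 t =>
      intro acc hacc
      simp only [List.foldl, repair_split_legal_terms_py, pvRepairStep]
      rw [if_neg]
      intro ⟨hset, hlast⟩
      exact hacc t rfl hset hlast
  | case3 t n rest hcond ih =>
      intro acc hacc
      obtain ⟨ht, hn⟩ := hcond
      subst ht
      have h1 : pvRepairStep acc "adi" = acc ++ ["adi"] := by
        simp [pvRepairStep]
      have h2 : pvRepairStep (acc ++ ["adi"]) n = acc ++ ["adit" ++ n] := by
        simp [pvRepairStep, hn]
      rw [List.foldl_cons, h1, List.foldl_cons, h2]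
      rw [ih (acc ++ ["adit" ++ n]) ?_]
      · simp [repair_split_legal_terms_py, hn]
      · intro h hh _
        rw [List.getLast?_concat]
        intro heq
        rcases hn with hn | hn <;> simp [hn] at heq
  | case4 t n rest hcond ih =>
      intro acc hacc
      have h1 : pvRepairStep acc t = acc ++ [t] := by
        unfold pvRepairStep
        rw [if_neg]
        intro ⟨hset, hlast⟩
        exact hacc t rfl hset hlast
      rw [List.foldl_cons, h1]
      rw [ih (acc ++ [t]) ?_]
      · simp [repair_split_legal_terms_py, hcond]
      · intro h hh hset
        simp only [List.head?] at hh
        cases hh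
        rw [List.getLast?_concat]
        intro heq
        cases heq
        exact hcond ⟨rfl, hset⟩

-- ===== VERDICT (by name: the statement is the Claim_ definition above) =====
theorem repair_split_legal_terms_py_spec : Claim_equal_repair_split_legal_terms_py := by
  intro tokens _
  unfold Spec_repair_split_legal_terms_py repair_split_legal_terms_py_alt
  rw [pvRepair_fold_eq tokens [] (by intro h hh _; simp)]
  simp
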